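-- pv_equiv track=rewrite | github.com/InterviewAce/coaching-resources | solutions/python/bfs/adjacent_squares.py | get_largest_adjacent_square_group_size
-- ===== SOURCE A (Python) =====
-- from collections import defaultdict, deque
--
-- SIDE_LENGTH = 1
--
-- def are_connected(square_one, square_two):
--     square_one_x, square_one_y = square_one
--     square_two_x, square_two_y = square_two
--
--     positive_delta_x = abs(square_one_x - square_two_x)
--     positive_delta_y = abs(square_one_y - square_two_y)
--
--     are_touching_in_x_direction = (positive_delta_x == SIDE_LENGTH and positive_delta_y < SIDE_LENGTH)
--     are_touching_in_y_direction = (positive_delta_y == SIDE_LENGTH and positive_delta_x < SIDE_LENGTH)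
--
--     return are_touching_in_x_direction or are_touching_in_y_direction
--
-- def build_graph(nodes, are_connected):
--     graph = defaultdict(list)
--
--     for i in range(len(nodes)):
--         for j in range(i + 1, len(nodes)):
--             if are_connected(nodes[i], nodes[j]):
--                 graph[i].append(j)
--                 graph[j].append(i)
--
--     return graph
--
-- def get_component_size(start_node_id, graph, visited):
--     queue = deque()
--     queue.append(start_node_id)
--
--     visited.add(start_node_id)
--     component_size = 0
--
--     while queue:
--         node_id = queue.popleft()
--
--         component_size += 1
--
--         neighbor_ids = graph[node_id]
--         for neighbor_id in neighbor_ids: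
--             if neighbor_id in visited:
--                 continue
--
--             visited.add(neighbor_id)
--             queue.append(neighbor_id)
--
--     return component_size
--
-- def get_largest_adjacent_square_group_size(squares):
--     graph = build_graph(squares, are_connected)
--
--     largest_adjacent_square_group_size = 0
--     visited = set()
--
--     for square_id in range(len(squares)):
--         if square_id in visited:
--             continue
--
--         adjacent_square_group_size = get_component_size(square_id, graph, visited)
--         largest_adjacent_square_group_size = max(largest_adjacent_square_group_size, adjacent_square_group_size)
--
--     return largest_adjacent_square_group_size
-- ===== SOURCE B (Python) =====
-- def get_largest_adjacent_square_group_size(squares):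
--     # Hash every coordinate to its list of indices, then DFS each component
--     # through the four direct neighbor coordinates.
--     buckets = {}
--     for idx in range(len(squares)):
--         buckets.setdefault(squares[idx], []).append(idx)
--
--     n = len(squares)
--     visited = [False] * n
--     best = 0
--
--     for start in range(n):
--         if visited[start]:
--             continue
--         visited[start] = True
--         stack = [start]
--         size = 0
--         while stack:
--             i = stack.pop()
--             size += 1
--             x, y = squares[i]
--             for nb in ((x - 1, y), (x + 1, y), (x, y - 1), (x, y + 1)):
--                 for j in buckets.get(nb, ()):
--                     if not visited[j]:
--                         visited[j] = True
--                         stack.append(j)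
--         best = max(best, size)
--
--     return best
-- ===== Notes on version B (the rewrite author's own statement) =====
-- stated objective: faster
-- what changed: Replaces the O(n^2) all-pairs adjacency-graph construction plus queue BFS with a coordinate hash map (coordinate -> indices) so each square's neighbors are found by four direct lookups, and traverses components with a DFS stack over a boolean visited array.
import Mathlib
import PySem

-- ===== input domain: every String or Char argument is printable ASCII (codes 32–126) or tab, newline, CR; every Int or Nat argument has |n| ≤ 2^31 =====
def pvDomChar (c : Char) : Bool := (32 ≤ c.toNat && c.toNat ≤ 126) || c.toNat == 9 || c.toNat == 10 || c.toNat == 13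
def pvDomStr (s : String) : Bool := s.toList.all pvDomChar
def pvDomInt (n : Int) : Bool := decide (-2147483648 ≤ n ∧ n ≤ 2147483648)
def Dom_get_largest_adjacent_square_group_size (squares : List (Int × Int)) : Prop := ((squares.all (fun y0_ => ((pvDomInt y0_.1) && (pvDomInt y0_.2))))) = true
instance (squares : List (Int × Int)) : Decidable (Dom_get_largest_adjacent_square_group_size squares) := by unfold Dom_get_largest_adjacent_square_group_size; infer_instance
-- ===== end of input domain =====

-- B replaces the O(n^2) all-pairs graph construction + queue BFS by a coordinate hash map
-- (coordinate -> indices) with a DFS stack over a boolean visited array (faster: asymptotic).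


-- ===== PORT A =====
-- SIDE_LENGTH = 1 is inlined as the literal 1; Python abs on int is Int abs |·| (exact).
def are_connected (square_one square_two : Int × Int) : Bool :=
  let positive_delta_x := |square_one.1 - square_two.1|
  let positive_delta_y := |square_one.2 - square_two.2|
  (positive_delta_x == 1 && decide (positive_delta_y < 1)) ||
    (positive_delta_y == 1 && decide (positive_delta_x < 1))

-- defaultdict(list) with graph[i].append(j) is Dict.modify i [] (· ++ [j]) (exact: only getD
-- with default [] ever reads the dict).  Indices are the Nats 0..len-1 from range (exact).
def build_graph (nodes : List (Int × Int)) : PySem.Dict Nat (List Nat) :=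
  (List.range nodes.length).foldl (fun graph i =>
    (List.range' (i + 1) (nodes.length - (i + 1))).foldl (fun graph j =>
      if are_connected (nodes.getD i (0, 0)) (nodes.getD j (0, 0)) then
        (graph.modify i [] (· ++ [j])).modify j [] (· ++ [i])
      else graph) graph) PySem.Dict.empty

-- the while-loop of get_component_size; the deque is a List popped at the head, appended at the
-- tail.  fuel only makes the recursion structural: each iteration pops one entry and entries are
-- enqueued exactly when first visited, so the loop runs ≤ 1 + number of unvisited indices times;
-- every call below passes fuel = length + 1, which the spec lemma proves sufficient.
def get_component_size (graph : PySem.Dict Nat (List Nat)) :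
    Nat → List Nat → PySem.Set Nat → Int → Int × PySem.Set Nat
  | 0, _, visited, component_size => (component_size, visited)
  | _ + 1, [], visited, component_size => (component_size, visited)
  | fuel + 1, node_id :: queue, visited, component_size =>
    let st := ((graph.getD node_id []).foldl
      (fun (st : PySem.Set Nat × List Nat) neighbor_id =>
        if neighbor_id ∈ st.1 then st
        else (PySem.Set.add st.1 neighbor_id, st.2 ++ [neighbor_id])) (visited, queue))
    get_component_size graph fuel st.2 st.1 (component_size + 1)

def get_largest_adjacent_square_group_size (squares : List (Int × Int)) : Int :=
  let graph := build_graph squares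
  ((List.range squares.length).foldl (fun (st : Int × PySem.Set Nat) square_id =>
      if square_id ∈ st.2 then st
      else
        let r := get_component_size graph (squares.length + 1) [square_id]
          (PySem.Set.add st.2 square_id) 0
        (max st.1 r.1, r.2)) (0, PySem.Set.empty)).1

-- ===== PORT B =====
-- buckets.setdefault(squares[idx], []).append(idx) is Dict.modify (exact: only .get reads it).
def alt_buckets (squares : List (Int × Int)) : PySem.Dict (Int × Int) (List Nat) :=
  (List.range squares.length).foldl
    (fun buckets idx => buckets.modify (squares.getD idx (0, 0)) [] (· ++ [idx]))
    PySem.Dict.empty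

-- the while-loop of B; the Python list used as a stack (append/pop at the end) is a List with its
-- top at the head (push = cons, pop = head) — same values popped in the same order.  fuel as in A.
def alt_dfs (squares : List (Int × Int)) (buckets : PySem.Dict (Int × Int) (List Nat)) :
    Nat → List Nat → List Bool → Int → Int × List Bool
  | 0, _, visited, size => (size, visited)
  | _ + 1, [], visited, size => (size, visited)
  | fuel + 1, i :: stack, visited, size =>
    let xy := squares.getD i (0, 0)
    let st := [(xy.1 - 1, xy.2), (xy.1 + 1, xy.2), (xy.1, xy.2 - 1), (xy.1, xy.2 + 1)].foldl
      (fun st nb =>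
        (buckets.getD nb []).foldl
          (fun (st : List Bool × List Nat) j =>
            if st.1.getD j false then st else (st.1.set j true, j :: st.2)) st)
      (visited, stack)
    alt_dfs squares buckets fuel st.2 st.1 (size + 1)

def get_largest_adjacent_square_group_size_alt (squares : List (Int × Int)) : Int :=
  let buckets := alt_buckets squares
  ((List.range squares.length).foldl (fun (st : Int × List Bool) start =>
      if st.2.getD start false then st
      else
        let r := alt_dfs squares buckets (squares.length + 1) [start]
          (st.2.set start true) 0
        (max st.1 r.1, r.2)) (0, List.replicate squares.length false)).1

-- ===== PRECONDITION & SPEC =====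
def Spec_get_largest_adjacent_square_group_size (squares : List (Int × Int)) (out : Int) : Prop := out = get_largest_adjacent_square_group_size_alt squares
instance (squares : List (Int × Int)) (out : Int) : Decidable (Spec_get_largest_adjacent_square_group_size squares out) := by unfold Spec_get_largest_adjacent_square_group_size; infer_instance

-- ===== CLAIM (what is proved, stated in full; the proofs are below) =====
def Claim_equal_get_largest_adjacent_square_group_size : Prop := ∀ (squares : List (Int × Int)), Dom_get_largest_adjacent_square_group_size squares → Spec_get_largest_adjacent_square_group_size squares (get_largest_adjacent_square_group_size squares)

-- ===== LEMMAS AND PROOFS =====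

-- index i and j hold adjacent (side-sharing) unit squares
def Adj (squares : List (Int × Int)) (i j : Nat) : Prop :=
  i < squares.length ∧ j < squares.length ∧
    are_connected (squares.getD i (0, 0)) (squares.getD j (0, 0)) = true

inductive Reach (squares : List (Int × Int)) (s : Nat) : Nat → Prop
  | refl : Reach squares s s
  | step {i j : Nat} : Reach squares s i → Adj squares i j → Reach squares s j

-- M is the connected component of s relative to the already-visited set V0
def CompOf (squares : List (Int × Int)) (V0 : Finset Nat) (s : Nat) (M : Finset Nat) : Prop :=
  s ∈ M ∧ (∀ i ∈ M, i ∉ V0) ∧ (∀ i ∈ M, i < squares.length) ∧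
    (∀ i ∈ M, ∀ j, Adj squares i j → j ∈ M ∨ j ∈ V0) ∧ (∀ i ∈ M, Reach squares s i)

def ClosedF (squares : List (Int × Int)) (V0 : Finset Nat) : Prop :=
  ∀ i ∈ V0, ∀ j, Adj squares i j → j ∈ V0

lemma compOf_unique {squares : List (Int × Int)} {V0 : Finset Nat} {s : Nat}
    {M1 M2 : Finset Nat} (h1 : CompOf squares V0 s M1) (h2 : CompOf squares V0 s M2)
    (hc : ClosedF squares V0) : M1 = M2 := by
  have key : ∀ k, Reach squares s k → (k ∈ M1 ∧ k ∈ M2) ∨ k ∈ V0 := by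
    intro k hk
    induction hk with
    | refl => exact Or.inl ⟨h1.1, h2.1⟩
    | @step i j _ hadj ih =>
      rcases ih with ⟨hm1, hm2⟩ | hv0
      · rcases h1.2.2.2.1 _ hm1 _ hadj with hj1 | hj0
        · rcases h2.2.2.2.1 _ hm2 _ hadj with hj2 | hj0
          · exact Or.inl ⟨hj1, hj2⟩
          · exact Or.inr hj0
        · exact Or.inr hj0
      · exact Or.inr (hc _ hv0 _ hadj)
  ext k
  constructor
  · intro hk
    rcases key k (h1.2.2.2.2 _ hk) with ⟨_, h⟩ | h
    · exact h
    · exact absurd h (h1.2.1 _ hk)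
  · intro hk
    rcases key k (h2.2.2.2.2 _ hk) with ⟨h, _⟩ | h
    · exact h
    · exact absurd h (h2.2.1 _ hk)

lemma are_connected_iff (p q : Int × Int) :
    are_connected p q = true ↔
      q = (p.1 - 1, p.2) ∨ q = (p.1 + 1, p.2) ∨ q = (p.1, p.2 - 1) ∨ q = (p.1, p.2 + 1) := by
  obtain ⟨a, b⟩ := p; obtain ⟨c, d⟩ := q
  simp [are_connected, Prod.ext_iff, abs_eq (by norm_num : (0:Int) ≤ 1), abs_lt]
  omega

lemma are_connected_comm (p q : Int × Int) : are_connected p q = are_connected q p := by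
  simp [are_connected, abs_sub_comm]

lemma are_connected_self (p : Int × Int) : are_connected p p = false := by
  simp [are_connected]

lemma inner_mem (squares : List (Int × Int)) (i : Nat) (js : List Nat) :
    ∀ (g : PySem.Dict Nat (List Nat)) (a b : Nat), (∀ j ∈ js, i ≠ j) →
    (b ∈ ((js.foldl (fun graph j =>
        if are_connected (squares.getD i (0, 0)) (squares.getD j (0, 0)) then
          (graph.modify i [] (· ++ [j])).modify j [] (· ++ [i])
        else graph) g).getD a []) ↔
      b ∈ g.getD a [] ∨ ∃ j ∈ js,
        are_connected (squares.getD i (0, 0)) (squares.getD j (0, 0)) = true ∧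
          ((a = i ∧ b = j) ∨ (a = j ∧ b = i))) := by
  induction js with
  | nil => intro g a b _; simp
  | cons j js ih =>
    intro g a b hne
    have hij : i ≠ j := hne j List.mem_cons_self
    simp only [List.foldl_cons]
    by_cases hc : are_connected (squares.getD i (0, 0)) (squares.getD j (0, 0)) = true
    · rw [if_pos hc]
      rw [ih _ a b (fun x hx => hne x (List.mem_cons_of_mem _ hx))]
      have hg : ∀ a b : Nat,
          b ∈ (((g.modify i [] (· ++ [j])).modify j [] (· ++ [i])).getD a []) ↔
            b ∈ g.getD a [] ∨ (a = i ∧ b = j) ∨ (a = j ∧ b = i) := by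
        intro a b
        have hji : ¬ (j = i) := fun h => hij h.symm
        rw [PySem.Dict.getD_modify]
        by_cases haj : a = j
        · rw [if_pos haj]; subst haj
          rw [PySem.Dict.getD_modify, if_neg hji]
          simp only [List.mem_append, List.mem_singleton, hji, false_and, false_or]
          tauto
        · rw [if_neg haj, PySem.Dict.getD_modify]
          by_cases hai : a = i
          · rw [if_pos hai]; subst hai
            simp only [List.mem_append, List.mem_singleton, haj, false_and, or_false]
            tauto
          · rw [if_neg hai]
            simp [hai, haj]
      rw [hg a b]
      simp only [List.mem_cons]
      constructor
      · rintro ((hb | hp | hp) | ⟨x, hx, hcx, hp⟩)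
        · exact Or.inl hb
        · exact Or.inr ⟨j, Or.inl rfl, hc, Or.inl hp⟩
        · exact Or.inr ⟨j, Or.inl rfl, hc, Or.inr hp⟩
        · exact Or.inr ⟨x, Or.inr hx, hcx, hp⟩
      · rintro (hb | ⟨x, (rfl | hx), hcx, hp⟩)
        · exact Or.inl (Or.inl hb)
        · exact Or.inl (Or.inr hp)
        · exact Or.inr ⟨x, hx, hcx, hp⟩
    · rw [if_neg hc]
      rw [ih g a b (fun x hx => hne x (List.mem_cons_of_mem _ hx))]
      simp only [List.mem_cons]
      constructor
      · rintro (hb | ⟨x, hx, hcx, hp⟩)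
        · exact Or.inl hb
        · exact Or.inr ⟨x, Or.inr hx, hcx, hp⟩
      · rintro (hb | ⟨x, (rfl | hx), hcx, hp⟩)
        · exact Or.inl hb
        · exact absurd hcx hc
        · exact Or.inr ⟨x, hx, hcx, hp⟩

lemma outer_mem (squares : List (Int × Int)) (is : List Nat) :
    ∀ (g : PySem.Dict Nat (List Nat)) (a b : Nat), (∀ i ∈ is, i < squares.length) →
    (b ∈ ((is.foldl (fun graph i =>
        (List.range' (i + 1) (squares.length - (i + 1))).foldl (fun graph j =>
          if are_connected (squares.getD i (0, 0)) (squares.getD j (0, 0)) then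
            (graph.modify i [] (· ++ [j])).modify j [] (· ++ [i])
          else graph) graph) g).getD a []) ↔
      b ∈ g.getD a [] ∨ ∃ i ∈ is, ∃ j, i < j ∧ j < squares.length ∧
        are_connected (squares.getD i (0, 0)) (squares.getD j (0, 0)) = true ∧
          ((a = i ∧ b = j) ∨ (a = j ∧ b = i))) := by
  induction is with
  | nil => intro g a b _; simp
  | cons i is ih =>
    intro g a b hlt
    have hin : i < squares.length := hlt i List.mem_cons_self
    simp only [List.foldl_cons]
    rw [ih _ a b (fun x hx => hlt x (List.mem_cons_of_mem _ hx))]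
    rw [inner_mem squares i _ g a b
      (fun x hx => by
        have := List.mem_range'_1.mp hx
        omega)]
    have hmem : ∀ x : Nat, x ∈ List.range' (i + 1) (squares.length - (i + 1)) ↔
        i < x ∧ x < squares.length := by
      intro x
      rw [List.mem_range'_1]
      omega
    simp only [List.mem_cons]
    constructor
    · rintro ((hb | ⟨x, hx, hcx, hp⟩) | ⟨y, hy, z, hz1, hz2, hcz, hp⟩)
      · exact Or.inl hb
      · have := (hmem x).mp hx
        exact Or.inr ⟨i, Or.inl rfl, x, this.1, this.2, hcx, hp⟩
      · exact Or.inr ⟨y, Or.inr hy, z, hz1, hz2, hcz, hp⟩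
    · rintro (hb | ⟨y, (rfl | hy), z, hz1, hz2, hcz, hp⟩)
      · exact Or.inl (Or.inl hb)
      · exact Or.inl (Or.inr ⟨z, (hmem z).mpr ⟨hz1, hz2⟩, hcz, hp⟩)
      · exact Or.inr ⟨y, hy, z, hz1, hz2, hcz, hp⟩

lemma mem_build_graph (squares : List (Int × Int)) (a b : Nat) :
    b ∈ (build_graph squares).getD a [] ↔ Adj squares a b := by
  unfold build_graph
  rw [outer_mem squares _ _ a b (fun x hx => List.mem_range.mp hx)]
  simp only [PySem.Dict.getD_empty, List.not_mem_nil, false_or, List.mem_range]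
  constructor
  · rintro ⟨i, hi, j, hij, hj, hc, (⟨rfl, rfl⟩ | ⟨rfl, rfl⟩)⟩
    · exact ⟨hi, hj, hc⟩
    · exact ⟨hj, hi, by rw [are_connected_comm]; exact hc⟩
  · rintro ⟨ha, hb, hc⟩
    have hab : a ≠ b := by
      rintro rfl
      rw [are_connected_self] at hc
      exact absurd hc (by simp)
    rcases Nat.lt_or_gt_of_ne hab with h | h
    · exact ⟨a, ha, b, h, hb, hc, Or.inl ⟨rfl, rfl⟩⟩
    · exact ⟨b, hb, a, h, ha, by rw [are_connected_comm]; exact hc, Or.inr ⟨rfl, rfl⟩⟩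

lemma mem_bucket (squares : List (Int × Int)) (c : Int × Int) (j : Nat) :
    j ∈ (alt_buckets squares).getD c [] ↔ j < squares.length ∧ squares.getD j (0, 0) = c := by
  have h : alt_buckets squares =
      ((List.range squares.length).map (fun i => (squares.getD i (0, 0), i))).foldl
        (fun d (p : (Int × Int) × Nat) => d.modify p.1 [] (· ++ [p.2])) PySem.Dict.empty := by
    rw [List.foldl_map]; rfl
  rw [h, PySem.Dict.getD_foldl_modify_append]
  rw [List.filter_map, List.map_map]
  simp only [PySem.Dict.getD_empty, List.nil_append, List.mem_map, List.mem_filter,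
    List.mem_range, Function.comp_def, beq_iff_eq]
  constructor
  · rintro ⟨i, ⟨hi, hceq⟩, rfl⟩
    exact ⟨hi, hceq⟩
  · rintro ⟨hj, hc⟩
    exact ⟨j, ⟨hj, hc⟩, rfl⟩

lemma foldA_spec (ns : List Nat) :
    ∀ (vis : PySem.Set Nat) (q : List Nat) (VF : Finset Nat),
      (∀ x, x ∈ vis ↔ x ∈ VF) →
      ∃ added vis',
        ns.foldl (fun (st : PySem.Set Nat × List Nat) neighbor_id =>
            if neighbor_id ∈ st.1 then st
            else (PySem.Set.add st.1 neighbor_id, st.2 ++ [neighbor_id])) (vis, q)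
          = (vis', q ++ added) ∧
        added.Nodup ∧ (∀ x, x ∈ added ↔ x ∈ ns ∧ x ∉ VF) ∧
        (∀ x, x ∈ vis' ↔ x ∈ VF ∨ x ∈ ns) := by
  induction ns with
  | nil =>
    intro vis q VF hvis
    exact ⟨[], vis, by simp, by simp, by simp, by simpa using hvis⟩
  | cons j ns ih =>
    intro vis q VF hvis
    simp only [List.foldl_cons]
    by_cases hj : j ∈ VF
    · rw [if_pos ((hvis j).mpr hj)]
      obtain ⟨added, vis', heq, hnd, hmem, hvis'⟩ := ih vis q VF hvis
      refine ⟨added, vis', heq, hnd, ?_, ?_⟩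
      · intro x
        have := hmem x
        simp only [List.mem_cons]
        by_cases hxj : x = j <;> subst_eqs <;> tauto
      · intro x
        have := hvis' x
        simp only [List.mem_cons]
        by_cases hxj : x = j <;> subst_eqs <;> tauto
    · rw [if_neg (fun h => hj ((hvis j).mp h))]
      have hvis2 : ∀ x, x ∈ PySem.Set.add vis j ↔ x ∈ insert j VF := by
        intro x
        rw [PySem.Set.mem_add, hvis x, Finset.mem_insert]
        tauto
      obtain ⟨added, vis', heq, hnd, hmem, hvis'⟩ :=
        ih (PySem.Set.add vis j) (q ++ [j]) (insert j VF) hvis2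
      have hjadded : j ∉ added := fun h => ((hmem j).mp h).2 (Finset.mem_insert_self _ _)
      refine ⟨j :: added, vis', by simpa using heq, List.nodup_cons.mpr ⟨hjadded, hnd⟩, ?_, ?_⟩
      · intro x
        have := hmem x
        simp only [Finset.mem_insert] at this
        simp only [List.mem_cons]
        by_cases hxj : x = j <;> subst_eqs <;> tauto
      · intro x
        have := hvis' x
        simp only [Finset.mem_insert] at this
        simp only [List.mem_cons]
        by_cases hxj : x = j <;> subst_eqs <;> tauto

lemma getD_set_true_iff (vis : List Bool) (j x : Nat) (hj : j < vis.length) :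
    ((vis.set j true).getD x false = true) ↔ (x = j ∨ vis.getD x false = true) := by
  simp only [List.getD_eq_getElem?_getD, List.getElem?_set]
  by_cases h : j = x
  · subst h; simp [hj]
  · have h' : x ≠ j := fun hh => h hh.symm
    simp [h, h']

lemma foldB_spec (ms : List Nat) :
    ∀ (vis : List Bool) (stk : List Nat) (VF : Finset Nat),
      (∀ x, vis.getD x false = true ↔ x ∈ VF) →
      (∀ j ∈ ms, j < vis.length) →
      ∃ added vis',
        ms.foldl (fun (st : List Bool × List Nat) j =>
            if st.1.getD j false then st else (st.1.set j true, j :: st.2)) (vis, stk)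
          = (vis', added ++ stk) ∧
        added.Nodup ∧ (∀ x, x ∈ added ↔ x ∈ ms ∧ x ∉ VF) ∧
        (∀ x, vis'.getD x false = true ↔ x ∈ VF ∨ x ∈ ms) ∧ vis'.length = vis.length := by
  induction ms with
  | nil =>
    intro vis stk VF hvis _
    exact ⟨[], vis, by simp, by simp, by simp, by simpa using hvis, rfl⟩
  | cons j ms ih =>
    intro vis stk VF hvis hlt
    have hjlt : j < vis.length := hlt j (List.mem_cons_self)
    simp only [List.foldl_cons]
    by_cases hj : j ∈ VF
    · rw [if_pos ((hvis j).mpr hj)]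
      obtain ⟨added, vis', heq, hnd, hmem, hvis', hlen⟩ :=
        ih vis stk VF hvis (fun a ha => hlt a (List.mem_cons_of_mem _ ha))
      refine ⟨added, vis', heq, hnd, ?_, ?_, hlen⟩
      · intro x
        have := hmem x
        simp only [List.mem_cons]
        by_cases hxj : x = j <;> subst_eqs <;> tauto
      · intro x
        have := hvis' x
        simp only [List.mem_cons]
        by_cases hxj : x = j <;> subst_eqs <;> tauto
    · rw [if_neg (fun h => hj ((hvis j).mp h))]
      have hvis2 : ∀ x, (vis.set j true).getD x false = true ↔ x ∈ insert j VF := by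
        intro x
        rw [getD_set_true_iff vis j x hjlt, hvis x, Finset.mem_insert]
      obtain ⟨added, vis', heq, hnd, hmem, hvis', hlen⟩ :=
        ih (vis.set j true) (j :: stk) (insert j VF) hvis2
          (fun a ha => by rw [List.length_set]; exact hlt a (List.mem_cons_of_mem _ ha))
      have hjadded : j ∉ added := fun h => ((hmem j).mp h).2 (Finset.mem_insert_self _ _)
      refine ⟨added ++ [j], vis', by rw [heq, List.append_cons], ?_, ?_, ?_, by rw [hlen, List.length_set]⟩
      · rw [List.nodup_append]
        exact ⟨hnd, List.nodup_singleton _, fun a ha b hb => by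
          rw [List.mem_singleton] at hb; subst hb; exact fun h => hjadded (h ▸ ha)⟩
      · intro x
        have := hmem x
        simp only [Finset.mem_insert] at this
        simp only [List.mem_append, List.mem_cons, List.not_mem_nil, or_false]
        by_cases hxj : x = j <;> subst_eqs <;> tauto
      · intro x
        have := hvis' x
        simp only [Finset.mem_insert] at this
        simp only [List.mem_cons]
        by_cases hxj : x = j <;> subst_eqs <;> tauto

lemma get_component_size_spec (squares : List (Int × Int)) (V0 : Finset Nat) (s : Nat) :
    ∀ (fuel : Nat) (q : List Nat) (vis : PySem.Set Nat) (VF : Finset Nat) (size : Int),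
      (∀ x, x ∈ vis ↔ x ∈ VF) → V0 ⊆ VF →
      q.Nodup → (∀ i ∈ q, i ∈ VF \ V0) →
      (VF \ V0) ⊆ Finset.range squares.length → s ∈ VF \ V0 →
      (∀ i ∈ VF \ V0, Reach squares s i) →
      (∀ i ∈ VF \ V0, i ∉ q → ∀ j, Adj squares i j → j ∈ VF) →
      size + q.length = ((VF \ V0).card : Int) →
      q.length + (Finset.range squares.length \ VF).card ≤ fuel →
      ∃ M vis',
        get_component_size (build_graph squares) fuel q vis size = ((M.card : Int), vis') ∧
        (∀ x, x ∈ vis' ↔ x ∈ V0 ∨ x ∈ M) ∧ CompOf squares V0 s M := by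
  intro fuel
  induction fuel with
  | zero =>
    intro q vis VF size hvis hsub hnd hqmem hrange hs hreach hproc hsize hfuel
    have hq : q = [] := List.length_eq_zero_iff.mp (by omega)
    subst hq
    refine ⟨VF \ V0, vis, ?_, ?_, ?_⟩
    · have : size = ((VF \ V0).card : Int) := by simpa using hsize
      simp [get_component_size, this]
    · intro x
      rw [hvis x]
      constructor
      · intro hx
        by_cases hx0 : x ∈ V0
        · exact Or.inl hx0
        · exact Or.inr (Finset.mem_sdiff.mpr ⟨hx, hx0⟩)
      · rintro (hx | hx)
        · exact hsub hx
        · exact (Finset.mem_sdiff.mp hx).1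
    · refine ⟨hs, fun i hi => (Finset.mem_sdiff.mp hi).2,
        fun i hi => Finset.mem_range.mp (hrange hi), ?_, hreach⟩
      intro i hi j hadj
      have hj : j ∈ VF := hproc i hi (List.not_mem_nil) j hadj
      by_cases hj0 : j ∈ V0
      · exact Or.inr hj0
      · exact Or.inl (Finset.mem_sdiff.mpr ⟨hj, hj0⟩)
  | succ fuel ih =>
    intro q vis VF size hvis hsub hnd hqmem hrange hs hreach hproc hsize hfuel
    match q with
    | [] =>
      refine ⟨VF \ V0, vis, ?_, ?_, ?_⟩
      · have : size = ((VF \ V0).card : Int) := by simpa using hsize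
        simp [get_component_size, this]
      · intro x
        rw [hvis x]
        constructor
        · intro hx
          by_cases hx0 : x ∈ V0
          · exact Or.inl hx0
          · exact Or.inr (Finset.mem_sdiff.mpr ⟨hx, hx0⟩)
        · rintro (hx | hx)
          · exact hsub hx
          · exact (Finset.mem_sdiff.mp hx).1
      · refine ⟨hs, fun i hi => (Finset.mem_sdiff.mp hi).2,
          fun i hi => Finset.mem_range.mp (hrange hi), ?_, hreach⟩
        intro i hi j hadj
        have hj : j ∈ VF := hproc i hi (List.not_mem_nil) j hadj
        by_cases hj0 : j ∈ V0
        · exact Or.inr hj0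
        · exact Or.inl (Finset.mem_sdiff.mpr ⟨hj, hj0⟩)
    | i :: rest =>
      obtain ⟨added, vis1, heq, hndadd, hmemadd, hvis1⟩ :=
        foldA_spec ((build_graph squares).getD i []) vis rest VF hvis
      have hstep : get_component_size (build_graph squares) (fuel + 1) (i :: rest) vis size =
          get_component_size (build_graph squares) fuel (rest ++ added) vis1 (size + 1) := by
        show get_component_size (build_graph squares) fuel
          (((build_graph squares).getD i []).foldl _ (vis, rest)).2
          (((build_graph squares).getD i []).foldl _ (vis, rest)).1 (size + 1) = _
        rw [heq]
      have hadj : ∀ x, x ∈ (build_graph squares).getD i [] ↔ Adj squares i x :=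
        fun x => mem_build_graph squares i x
      have hiD : i ∈ VF \ V0 := hqmem i List.mem_cons_self
      have hadded : ∀ x ∈ added, x ∉ VF ∧ Adj squares i x := by
        intro x hx
        obtain ⟨hx1, hx2⟩ := (hmemadd x).mp hx
        exact ⟨hx2, (hadj x).mp hx1⟩
      have hAFsub : added.toFinset ⊆ Finset.range squares.length \ VF := by
        intro x hx
        rw [List.mem_toFinset] at hx
        obtain ⟨hnx, hax⟩ := hadded x hx
        exact Finset.mem_sdiff.mpr ⟨Finset.mem_range.mpr hax.2.1, hnx⟩
      have hAFcard : added.toFinset.card = added.length := List.toFinset_card_of_nodup hndadd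
      set VF1 := VF ∪ added.toFinset with hVF1
      have hvis1' : ∀ x, x ∈ vis1 ↔ x ∈ VF1 := by
        intro x
        rw [hvis1 x, hVF1, Finset.mem_union, List.mem_toFinset]
        constructor
        · rintro (hx | hx)
          · exact Or.inl hx
          · by_cases hxv : x ∈ VF
            · exact Or.inl hxv
            · exact Or.inr ((hmemadd x).mpr ⟨hx, hxv⟩)
        · rintro (hx | hx)
          · exact Or.inl hx
          · exact Or.inr ((hmemadd x).mp hx).1
      have hD1 : VF1 \ V0 = (VF \ V0) ∪ added.toFinset := by
        ext x
        simp only [hVF1, Finset.mem_sdiff, Finset.mem_union, List.mem_toFinset]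
        constructor
        · rintro ⟨hx | hx, hx0⟩
          · exact Or.inl ⟨hx, hx0⟩
          · exact Or.inr hx
        · rintro (⟨hx, hx0⟩ | hx)
          · exact ⟨Or.inl hx, hx0⟩
          · exact ⟨Or.inr hx, fun hx0 => ((hadded x hx).1 (hsub hx0))⟩
      have hDdisj : Disjoint (VF \ V0) added.toFinset := by
        rw [Finset.disjoint_left]
        intro x hx hx2
        rw [List.mem_toFinset] at hx2
        exact (hadded x hx2).1 (Finset.mem_sdiff.mp hx).1
      obtain ⟨M, vis', hval, hvisM, hcomp⟩ := ih (rest ++ added) vis1 VF1 (size + 1)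
        hvis1'
        (hsub.trans Finset.subset_union_left)
        (by
          rw [List.nodup_append]
          exact ⟨(List.nodup_cons.mp hnd).2, hndadd, fun a ha b hb hab => by
            subst hab
            exact (hadded a hb).1 (Finset.mem_sdiff.mp (hqmem a (List.mem_cons_of_mem _ ha))).1⟩)
        (by
          intro x hx
          rw [hD1, Finset.mem_union]
          rcases List.mem_append.mp hx with hx | hx
          · exact Or.inl (hqmem x (List.mem_cons_of_mem _ hx))
          · exact Or.inr (List.mem_toFinset.mpr hx))
        (by
          rw [hD1]
          intro x hx
          rcases Finset.mem_union.mp hx with hx | hx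
          · exact hrange hx
          · exact (Finset.mem_sdiff.mp (hAFsub hx)).1)
        (by rw [hD1]; exact Finset.mem_union_left _ hs)
        (by
          rw [hD1]
          intro x hx
          rcases Finset.mem_union.mp hx with hx | hx
          · exact hreach x hx
          · exact Reach.step (hreach i hiD) ((hadded x (List.mem_toFinset.mp hx)).2))
        (by
          rw [hD1]
          intro x hx hxq j hadjx
          rcases Finset.mem_union.mp hx with hx | hx
          · by_cases hxi : x = i
            · subst hxi
              have : j ∈ (build_graph squares).getD x [] := (hadj j).mpr hadjx
              by_cases hjv : j ∈ VF
              · exact Finset.mem_union_left _ hjv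
              · exact Finset.mem_union_right _
                  (List.mem_toFinset.mpr ((hmemadd j).mpr ⟨this, hjv⟩))
            · have hxq' : x ∉ i :: rest := by
                intro hmem
                rcases List.mem_cons.mp hmem with h | h
                · exact hxi h
                · exact hxq (List.mem_append.mpr (Or.inl h))
              exact Finset.mem_union_left _ (hproc x hx hxq' j hadjx)
          · exact absurd (List.mem_append.mpr (Or.inr (List.mem_toFinset.mp hx))) hxq)
        (by
          rw [hD1, Finset.card_union_of_disjoint hDdisj, hAFcard]
          rw [List.length_append]
          rw [List.length_cons] at hsize
          push_cast at hsize ⊢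
          omega)
        (by
          have hsd : Finset.range squares.length \ VF1 =
              (Finset.range squares.length \ VF) \ added.toFinset := by
            ext x
            simp only [hVF1, Finset.mem_sdiff, Finset.mem_union]
            tauto
          rw [hsd, Finset.card_sdiff_of_subset hAFsub, List.length_append, hAFcard]
          have hle : added.toFinset.card ≤ (Finset.range squares.length \ VF).card :=
            Finset.card_le_card hAFsub
          rw [List.length_cons] at hfuel
          omega)
      refine ⟨M, vis', by rw [hstep]; exact hval, hvisM, hcomp⟩

lemma alt_dfs_spec (squares : List (Int × Int)) (V0 : Finset Nat) (s : Nat) :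
    ∀ (fuel : Nat) (q : List Nat) (vis : List Bool) (VF : Finset Nat) (size : Int),
      vis.length = squares.length →
      (∀ x, vis.getD x false = true ↔ x ∈ VF) → V0 ⊆ VF →
      q.Nodup → (∀ i ∈ q, i ∈ VF \ V0) →
      (VF \ V0) ⊆ Finset.range squares.length → s ∈ VF \ V0 →
      (∀ i ∈ VF \ V0, Reach squares s i) →
      (∀ i ∈ VF \ V0, i ∉ q → ∀ j, Adj squares i j → j ∈ VF) →
      size + q.length = ((VF \ V0).card : Int) →
      q.length + (Finset.range squares.length \ VF).card ≤ fuel →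
      ∃ M vis',
        alt_dfs squares (alt_buckets squares) fuel q vis size = ((M.card : Int), vis') ∧
        (∀ x, vis'.getD x false = true ↔ x ∈ V0 ∨ x ∈ M) ∧ vis'.length = squares.length ∧
        CompOf squares V0 s M := by
  intro fuel
  induction fuel with
  | zero =>
    intro q vis VF size hlen hvis hsub hnd hqmem hrange hs hreach hproc hsize hfuel
    have hq : q = [] := List.length_eq_zero_iff.mp (by omega)
    subst hq
    refine ⟨VF \ V0, vis, ?_, ?_, hlen, ?_⟩
    · have : size = ((VF \ V0).card : Int) := by simpa using hsize
      simp [alt_dfs, this]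
    · intro x
      rw [hvis x]
      constructor
      · intro hx
        by_cases hx0 : x ∈ V0
        · exact Or.inl hx0
        · exact Or.inr (Finset.mem_sdiff.mpr ⟨hx, hx0⟩)
      · rintro (hx | hx)
        · exact hsub hx
        · exact (Finset.mem_sdiff.mp hx).1
    · refine ⟨hs, fun i hi => (Finset.mem_sdiff.mp hi).2,
        fun i hi => Finset.mem_range.mp (hrange hi), ?_, hreach⟩
      intro i hi j hadj
      have hj : j ∈ VF := hproc i hi (List.not_mem_nil) j hadj
      by_cases hj0 : j ∈ V0
      · exact Or.inr hj0
      · exact Or.inl (Finset.mem_sdiff.mpr ⟨hj, hj0⟩)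
  | succ fuel ih =>
    intro q vis VF size hlen hvis hsub hnd hqmem hrange hs hreach hproc hsize hfuel
    match q with
    | [] =>
      refine ⟨VF \ V0, vis, ?_, ?_, hlen, ?_⟩
      · have : size = ((VF \ V0).card : Int) := by simpa using hsize
        simp [alt_dfs, this]
      · intro x
        rw [hvis x]
        constructor
        · intro hx
          by_cases hx0 : x ∈ V0
          · exact Or.inl hx0
          · exact Or.inr (Finset.mem_sdiff.mpr ⟨hx, hx0⟩)
        · rintro (hx | hx)
          · exact hsub hx
          · exact (Finset.mem_sdiff.mp hx).1
      · refine ⟨hs, fun i hi => (Finset.mem_sdiff.mp hi).2,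
          fun i hi => Finset.mem_range.mp (hrange hi), ?_, hreach⟩
        intro i hi j hadj
        have hj : j ∈ VF := hproc i hi (List.not_mem_nil) j hadj
        by_cases hj0 : j ∈ V0
        · exact Or.inr hj0
        · exact Or.inl (Finset.mem_sdiff.mpr ⟨hj, hj0⟩)
    | i :: rest =>
      have hiD : i ∈ VF \ V0 := hqmem i List.mem_cons_self
      have hi_lt : i < squares.length := Finset.mem_range.mp (hrange hiD)
      set c := squares.getD i (0, 0) with hc
      set msl := (alt_buckets squares).getD (c.1 - 1, c.2) [] ++
        ((alt_buckets squares).getD (c.1 + 1, c.2) [] ++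
          ((alt_buckets squares).getD (c.1, c.2 - 1) [] ++
            (alt_buckets squares).getD (c.1, c.2 + 1) [])) with hmsl
      have hnested : ∀ st0 : List Bool × List Nat,
          [(c.1 - 1, c.2), (c.1 + 1, c.2), (c.1, c.2 - 1), (c.1, c.2 + 1)].foldl
            (fun st nb => ((alt_buckets squares).getD nb []).foldl
              (fun (st : List Bool × List Nat) j =>
                if st.1.getD j false then st else (st.1.set j true, j :: st.2)) st) st0
          = msl.foldl (fun (st : List Bool × List Nat) j =>
              if st.1.getD j false then st else (st.1.set j true, j :: st.2)) st0 := by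
        intro st0
        simp only [hmsl, List.foldl_cons, List.foldl_nil, List.foldl_append]
      have hmsAdj : ∀ x, x ∈ msl ↔ Adj squares i x := by
        intro x
        have hcon := are_connected_iff (squares.getD i (0, 0)) (squares.getD x (0, 0))
        simp only [hmsl, List.mem_append, mem_bucket]
        unfold Adj
        rw [hcon, ← hc]
        constructor
        · rintro (⟨hx, hsq⟩ | ⟨hx, hsq⟩ | ⟨hx, hsq⟩ | ⟨hx, hsq⟩) <;>
            exact ⟨hi_lt, hx, by tauto⟩
        · rintro ⟨_, hx, hsq | hsq | hsq | hsq⟩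
          · exact Or.inl ⟨hx, hsq⟩
          · exact Or.inr (Or.inl ⟨hx, hsq⟩)
          · exact Or.inr (Or.inr (Or.inl ⟨hx, hsq⟩))
          · exact Or.inr (Or.inr (Or.inr ⟨hx, hsq⟩))
      have hmslt : ∀ j ∈ msl, j < vis.length := by
        intro j hj
        rw [hlen]
        exact ((hmsAdj j).mp hj).2.1
      obtain ⟨added, vis1, heq, hndadd, hmemadd, hvis1, hlen1⟩ :=
        foldB_spec msl vis rest VF hvis hmslt
      have hstep : alt_dfs squares (alt_buckets squares) (fuel + 1) (i :: rest) vis size =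
          alt_dfs squares (alt_buckets squares) fuel (added ++ rest) vis1 (size + 1) := by
        show alt_dfs squares (alt_buckets squares) fuel
          ([(c.1 - 1, c.2), (c.1 + 1, c.2), (c.1, c.2 - 1), (c.1, c.2 + 1)].foldl _ (vis, rest)).2
          ([(c.1 - 1, c.2), (c.1 + 1, c.2), (c.1, c.2 - 1), (c.1, c.2 + 1)].foldl _ (vis, rest)).1
          (size + 1) = _
        rw [hnested, heq]
      have hadded : ∀ x ∈ added, x ∉ VF ∧ Adj squares i x := by
        intro x hx
        obtain ⟨hx1, hx2⟩ := (hmemadd x).mp hx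
        exact ⟨hx2, (hmsAdj x).mp hx1⟩
      have hAFsub : added.toFinset ⊆ Finset.range squares.length \ VF := by
        intro x hx
        rw [List.mem_toFinset] at hx
        obtain ⟨hnx, hax⟩ := hadded x hx
        exact Finset.mem_sdiff.mpr ⟨Finset.mem_range.mpr hax.2.1, hnx⟩
      have hAFcard : added.toFinset.card = added.length := List.toFinset_card_of_nodup hndadd
      set VF1 := VF ∪ added.toFinset with hVF1
      have hvis1' : ∀ x, vis1.getD x false = true ↔ x ∈ VF1 := by
        intro x
        rw [hvis1 x, hVF1, Finset.mem_union, List.mem_toFinset]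
        constructor
        · rintro (hx | hx)
          · exact Or.inl hx
          · by_cases hxv : x ∈ VF
            · exact Or.inl hxv
            · exact Or.inr ((hmemadd x).mpr ⟨hx, hxv⟩)
        · rintro (hx | hx)
          · exact Or.inl hx
          · exact Or.inr ((hmemadd x).mp hx).1
      have hD1 : VF1 \ V0 = (VF \ V0) ∪ added.toFinset := by
        ext x
        simp only [hVF1, Finset.mem_sdiff, Finset.mem_union, List.mem_toFinset]
        constructor
        · rintro ⟨hx | hx, hx0⟩
          · exact Or.inl ⟨hx, hx0⟩
          · exact Or.inr hx
        · rintro (⟨hx, hx0⟩ | hx)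
          · exact ⟨Or.inl hx, hx0⟩
          · exact ⟨Or.inr hx, fun hx0 => ((hadded x hx).1 (hsub hx0))⟩
      have hDdisj : Disjoint (VF \ V0) added.toFinset := by
        rw [Finset.disjoint_left]
        intro x hx hx2
        rw [List.mem_toFinset] at hx2
        exact (hadded x hx2).1 (Finset.mem_sdiff.mp hx).1
      obtain ⟨M, vis', hval, hvisM, hlenM, hcomp⟩ := ih (added ++ rest) vis1 VF1 (size + 1)
        (by rw [hlen1, hlen])
        hvis1'
        (hsub.trans Finset.subset_union_left)
        (by
          rw [List.nodup_append]
          exact ⟨hndadd, (List.nodup_cons.mp hnd).2, fun a ha b hb hab => by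
            subst hab
            exact (hadded a ha).1 (Finset.mem_sdiff.mp (hqmem a (List.mem_cons_of_mem _ hb))).1⟩)
        (by
          intro x hx
          rw [hD1, Finset.mem_union]
          rcases List.mem_append.mp hx with hx | hx
          · exact Or.inr (List.mem_toFinset.mpr hx)
          · exact Or.inl (hqmem x (List.mem_cons_of_mem _ hx)))
        (by
          rw [hD1]
          intro x hx
          rcases Finset.mem_union.mp hx with hx | hx
          · exact hrange hx
          · exact (Finset.mem_sdiff.mp (hAFsub hx)).1)
        (by rw [hD1]; exact Finset.mem_union_left _ hs)
        (by
          rw [hD1]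
          intro x hx
          rcases Finset.mem_union.mp hx with hx | hx
          · exact hreach x hx
          · exact Reach.step (hreach i hiD) ((hadded x (List.mem_toFinset.mp hx)).2))
        (by
          rw [hD1]
          intro x hx hxq j hadjx
          rcases Finset.mem_union.mp hx with hx | hx
          · by_cases hxi : x = i
            · subst hxi
              have hjm : j ∈ msl := (hmsAdj j).mpr hadjx
              by_cases hjv : j ∈ VF
              · exact Finset.mem_union_left _ hjv
              · exact Finset.mem_union_right _
                  (List.mem_toFinset.mpr ((hmemadd j).mpr ⟨hjm, hjv⟩))
            · have hxq' : x ∉ i :: rest := by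
                intro hmem
                rcases List.mem_cons.mp hmem with h | h
                · exact hxi h
                · exact hxq (List.mem_append.mpr (Or.inr h))
              exact Finset.mem_union_left _ (hproc x hx hxq' j hadjx)
          · exact absurd (List.mem_append.mpr (Or.inl (List.mem_toFinset.mp hx))) hxq)
        (by
          rw [hD1, Finset.card_union_of_disjoint hDdisj, hAFcard]
          rw [List.length_append]
          rw [List.length_cons] at hsize
          push_cast at hsize ⊢
          omega)
        (by
          have hsd : Finset.range squares.length \ VF1 =
              (Finset.range squares.length \ VF) \ added.toFinset := by
            ext x
            simp only [hVF1, Finset.mem_sdiff, Finset.mem_union]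
            tauto
          rw [hsd, Finset.card_sdiff_of_subset hAFsub, List.length_append, hAFcard]
          have hle : added.toFinset.card ≤ (Finset.range squares.length \ VF).card :=
            Finset.card_le_card hAFsub
          rw [List.length_cons] at hfuel
          omega)
      refine ⟨M, vis', by rw [hstep]; exact hval, hvisM, hlenM, hcomp⟩

lemma outer_rel (squares : List (Int × Int)) :
    ∀ (l : List Nat) (bestA bestB : Int) (visA : PySem.Set Nat) (visB : List Bool)
      (VF : Finset Nat),
      bestA = bestB →
      (∀ x, x ∈ visA ↔ x ∈ VF) →
      visB.length = squares.length →
      (∀ x, visB.getD x false = true ↔ x ∈ VF) →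
      VF ⊆ Finset.range squares.length →
      ClosedF squares VF →
      (∀ s ∈ l, s < squares.length) →
      (l.foldl (fun (st : Int × PySem.Set Nat) square_id =>
          if square_id ∈ st.2 then st
          else
            let r := get_component_size (build_graph squares) (squares.length + 1) [square_id]
              (PySem.Set.add st.2 square_id) 0
            (max st.1 r.1, r.2)) (bestA, visA)).1
        = (l.foldl (fun (st : Int × List Bool) start =>
            if st.2.getD start false then st
            else
              let r := alt_dfs squares (alt_buckets squares) (squares.length + 1) [start]
                (st.2.set start true) 0
              (max st.1 r.1, r.2)) (bestB, visB)).1 := by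
  intro l
  induction l with
  | nil => intro bestA bestB visA visB VF hbest _ _ _ _ _ _; exact hbest
  | cons s l ih =>
    intro bestA bestB visA visB VF hbest hvisA hlenB hvisB hVFsub hVFclosed hl
    have hs_lt : s < squares.length := hl s List.mem_cons_self
    have hl' : ∀ x ∈ l, x < squares.length := fun x hx => hl x (List.mem_cons_of_mem _ hx)
    simp only [List.foldl_cons]
    by_cases hsV : s ∈ VF
    · rw [if_pos ((hvisA s).mpr hsV), if_pos ((hvisB s).mpr hsV)]
      exact ih bestA bestB visA visB VF hbest hvisA hlenB hvisB hVFsub hVFclosed hl'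
    · rw [if_neg (fun h => hsV ((hvisA s).mp h)), if_neg (fun h => hsV ((hvisB s).mp h))]
      have hD : insert s VF \ VF = {s} := by
        ext x
        simp only [Finset.mem_sdiff, Finset.mem_insert, Finset.mem_singleton]
        constructor
        · rintro ⟨rfl | hx, hnx⟩
          · rfl
          · exact absurd hx hnx
        · rintro rfl
          exact ⟨Or.inl rfl, hsV⟩
      have hfuel : 1 + (Finset.range squares.length \ insert s VF).card ≤
          squares.length + 1 := by
        have := Finset.card_le_card
          (Finset.sdiff_subset (s := Finset.range squares.length) (t := insert s VF))
        rw [Finset.card_range] at this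
        omega
      obtain ⟨MA, visA', hvalA, hvisA', hcompA⟩ :=
        get_component_size_spec squares VF s (squares.length + 1) [s]
          (PySem.Set.add visA s) (insert s VF) 0
          (by intro x; rw [PySem.Set.mem_add, hvisA x, Finset.mem_insert]; tauto)
          (Finset.subset_insert _ _)
          (List.nodup_singleton _)
          (by
            intro x hx
            rw [List.mem_singleton] at hx
            subst hx
            rw [hD]
            exact Finset.mem_singleton_self _)
          (by
            rw [hD]
            intro x hx
            rw [Finset.mem_singleton] at hx
            subst hx
            exact Finset.mem_range.mpr hs_lt)
          (by rw [hD]; exact Finset.mem_singleton_self _)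
          (by
            rw [hD]
            intro x hx
            rw [Finset.mem_singleton] at hx
            subst hx
            exact Reach.refl)
          (by
            rw [hD]
            intro x hx hxq
            rw [Finset.mem_singleton] at hx
            subst hx
            exact absurd (List.mem_singleton_self _) hxq)
          (by rw [hD]; simp)
          (by simpa using hfuel)
      obtain ⟨MB, visB', hvalB, hvisB', hlenB', hcompB⟩ :=
        alt_dfs_spec squares VF s (squares.length + 1) [s]
          (visB.set s true) (insert s VF) 0
          (by rw [List.length_set]; exact hlenB)
          (by
            intro x
            rw [getD_set_true_iff visB s x (hlenB ▸ hs_lt), hvisB x, Finset.mem_insert])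
          (Finset.subset_insert _ _)
          (List.nodup_singleton _)
          (by
            intro x hx
            rw [List.mem_singleton] at hx
            subst hx
            rw [hD]
            exact Finset.mem_singleton_self _)
          (by
            rw [hD]
            intro x hx
            rw [Finset.mem_singleton] at hx
            subst hx
            exact Finset.mem_range.mpr hs_lt)
          (by rw [hD]; exact Finset.mem_singleton_self _)
          (by
            rw [hD]
            intro x hx
            rw [Finset.mem_singleton] at hx
            subst hx
            exact Reach.refl)
          (by
            rw [hD]
            intro x hx hxq
            rw [Finset.mem_singleton] at hx
            subst hx
            exact absurd (List.mem_singleton_self _) hxq)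
          (by rw [hD]; simp)
          (by simpa using hfuel)
      have hMeq : MA = MB := compOf_unique hcompA hcompB hVFclosed
      rw [hvalA, hvalB]
      exact ih (max bestA (MA.card : Int)) (max bestB (MB.card : Int)) visA' visB'
        (VF ∪ MA)
        (by rw [hbest, hMeq])
        (by intro x; rw [hvisA' x, Finset.mem_union])
        hlenB'
        (by intro x; rw [hvisB' x, Finset.mem_union, hMeq])
        (by
          intro x hx
          rcases Finset.mem_union.mp hx with hx | hx
          · exact hVFsub hx
          · exact Finset.mem_range.mpr (hcompA.2.2.1 x hx))
        (by
          intro x hx j hadj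
          rcases Finset.mem_union.mp hx with hx | hx
          · exact Finset.mem_union_left _ (hVFclosed x hx j hadj)
          · rcases hcompA.2.2.2.1 x hx j hadj with hj | hj
            · exact Finset.mem_union_right _ hj
            · exact Finset.mem_union_left _ hj)
        hl'

-- ===== VERDICT (by name: the statement is the Claim_ definition above) =====
theorem get_largest_adjacent_square_group_size_spec : Claim_equal_get_largest_adjacent_square_group_size := by
  intro squares _
  unfold Spec_get_largest_adjacent_square_group_size
  unfold get_largest_adjacent_square_group_size get_largest_adjacent_square_group_size_alt
  exact outer_rel squares (List.range squares.length) 0 0 PySem.Set.empty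
    (List.replicate squares.length false) ∅ rfl
    (by simp [PySem.Set.empty]) (by simp) (by simp) (by simp) (by intro i hi; simp at hi)
    (by intro s hs; simpa using List.mem_range.mp hs)
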